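-- pv_equiv track=rewrite | github.com/michalprusek/NLP | src/ecoflow/optimization_loop.py | _is_valid_prompt
-- ===== SOURCE A (Python) =====
-- def _is_valid_prompt(text: str) -> bool:
--     """
--     Check if prompt is valid for evaluation.
--
--     A valid prompt:
--     - Has at least 10 characters
--     - Contains at least 3 words
--     - Does not have excessive repetition
--
--     Args:
--         text: Decoded prompt text
--
--     Returns:
--         True if prompt is valid
--     """
--     if not text or len(text) < 10:
--         return False
--
--     words = text.split()
--     if len(words) < 3:
--         return False
--
--     # Check for excessive repetition (same word > 50% of text)
--     if words:
--         word_counts = {}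
--         for word in words:
--             word_lower = word.lower()
--             word_counts[word_lower] = word_counts.get(word_lower, 0) + 1
--         max_count = max(word_counts.values())
--         if max_count > len(words) * 0.5 and len(words) > 5:
--             return False
--
--     return True
-- ===== SOURCE B (Python) =====
-- def _is_valid_prompt(text: str) -> bool:
--     if len(text) < 10:
--         return False
--     words = text.split()
--     n = len(words)
--     if n < 3:
--         return False
--     # sort the lowercased words, then find the maximum frequency as the
--     # longest run of equal consecutive words in the sorted list
--     sw = sorted(w.lower() for w in words)
--     prev = sw[0]
--     run = 1
--     max_run = 1
--     for w in sw[1:]: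
--         run = run + 1 if w == prev else 1
--         prev = w
--         if run > max_run:
--             max_run = run
--     return not (max_run * 2 > n and n > 5)
-- ===== Notes on version B (the rewrite author's own statement) =====
-- stated objective: alternative
-- what changed: The dict-counting loop plus max() over its values is replaced by sort-then-group: the lowercased words are sorted and a single run-length scan over the sorted list computes the maximum frequency as the longest run of equal consecutive words.
import Mathlib
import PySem

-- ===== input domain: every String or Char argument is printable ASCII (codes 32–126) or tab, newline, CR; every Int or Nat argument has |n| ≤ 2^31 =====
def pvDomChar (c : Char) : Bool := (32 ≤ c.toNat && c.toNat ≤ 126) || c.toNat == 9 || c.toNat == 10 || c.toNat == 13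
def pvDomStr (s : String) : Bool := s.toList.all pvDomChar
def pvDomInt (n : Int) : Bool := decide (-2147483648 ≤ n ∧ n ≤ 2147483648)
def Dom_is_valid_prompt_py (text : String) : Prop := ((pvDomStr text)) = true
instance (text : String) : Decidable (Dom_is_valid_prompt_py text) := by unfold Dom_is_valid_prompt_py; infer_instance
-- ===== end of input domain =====

-- B replaces A's word-count dictionary and max() by sort-then-group: sort the lowercased
-- words and take the longest run of equal consecutive words; objective: alternative.

-- ===== PORT A =====
-- '_is_valid_prompt' from src/ecoflow/optimization_loop.py, step for step.
-- 'max_count > len(words) * 0.5' is exact integer arithmetic (0.5 is exact, ints here are far below 2^53),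
-- ported as '2 * max_count > len(words)'.
def is_valid_prompt_py (text : String) : Bool :=
  if text = "" ∨ PySem.Str.len text < 10 then false
  else
    let words := PySem.Str.split₀ text
    if words.length < 3 then false
    else
      if words ≠ [] then
        let word_counts : PySem.Dict String Int :=
          words.foldl (fun d word =>
            let word_lower := PySem.Str.lower word
            d.insert word_lower (d.getD word_lower 0 + 1)) PySem.Dict.empty
        match PySem.List.max? word_counts.values (fun v => v) with
        | none => true   -- unreachable: words ≠ [] here, so word_counts.values is nonempty
        | some max_count =>
          if 2 * max_count > (words.length : Int) ∧ words.length > 5 then false else true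
      else true

-- ===== PORT B =====
-- transliteration of Source B: the for-loop over sw[1:] carrying (prev, run, max_run)
def maxRunLoop : List String → String → Nat → Nat → Nat
  | [], _, _, max_run => max_run
  | w :: ws, prev, run, max_run =>
      let run' := if w = prev then run + 1 else 1
      maxRunLoop ws w run' (if run' > max_run then run' else max_run)

def is_valid_prompt_py_alt (text : String) : Bool :=
  if PySem.Str.len text < 10 then false
  else
    let words := PySem.Str.split₀ text
    let n := words.length
    if n < 3 then false
    else
      let sw := PySem.List.sorted (words.map PySem.Str.lower) (fun x => x) false
      match sw with
      | [] => true   -- unreachable: n ≥ 3 so sw ≠ [] (sw[0] exists in Source B)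
      | s0 :: rest =>
        let max_run := maxRunLoop rest s0 1 1
        !(decide (max_run * 2 > n) && decide (n > 5))

-- ===== PRECONDITION & SPEC =====
def Spec_is_valid_prompt_py (text : String) (out : Bool) : Prop := out = is_valid_prompt_py_alt text
instance (text : String) (out : Bool) : Decidable (Spec_is_valid_prompt_py text out) := by unfold Spec_is_valid_prompt_py; infer_instance

-- ===== CLAIM (what is proved, stated in full; the proofs are below) =====
def Claim_equal_is_valid_prompt_py : Prop := ∀ (text : String), Dom_is_valid_prompt_py text → Spec_is_valid_prompt_py text (is_valid_prompt_py text)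

-- ===== LEMMAS AND PROOFS =====

-- maximum multiplicity of any element of l (0 for [])
def mc (l : List String) : Nat := (l.map (fun w => l.count w)).foldr max 0

theorem mem_le_foldr_max (a : Nat) (l : List Nat) (h : a ∈ l) : a ≤ l.foldr max 0 := by
  induction l with
  | nil => cases h
  | cons x xs ih =>
    rcases List.mem_cons.1 h with rfl | h'
    · exact le_max_left _ _
    · exact (ih h').trans (le_max_right _ _)

theorem foldr_max_le (c : Nat) (l : List Nat) (h : ∀ a ∈ l, a ≤ c) : l.foldr max 0 ≤ c := by
  induction l with
  | nil => exact Nat.zero_le c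
  | cons x xs ih =>
    exact max_le (h x (List.mem_cons_self)) (ih fun a ha => h a (List.mem_cons_of_mem _ ha))

theorem count_le_mc (w : String) (l : List String) (h : w ∈ l) : l.count w ≤ mc l :=
  mem_le_foldr_max _ _ (List.mem_map.2 ⟨w, h, rfl⟩)

theorem mc_le (c : Nat) (l : List String) (h : ∀ w ∈ l, l.count w ≤ c) : mc l ≤ c :=
  foldr_max_le c _ (by
    intro a ha
    rcases List.mem_map.1 ha with ⟨w, hw, rfl⟩
    exact h w hw)

theorem mc_perm {l l' : List String} (h : l.Perm l') : mc l = mc l' := by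
  apply le_antisymm
  · exact mc_le _ _ fun w hw => h.count_eq w ▸ count_le_mc w l' (h.mem_iff.1 hw)
  · exact mc_le _ _ fun w hw => (h.count_eq w).symm ▸ count_le_mc w l (h.mem_iff.2 hw)

theorem foldr_max_append (l₁ l₂ : List Nat) :
    (l₁ ++ l₂).foldr max 0 = max (l₁.foldr max 0) (l₂.foldr max 0) := by
  induction l₁ with
  | nil => simp
  | cons x xs ih => simp [ih, max_assoc]

-- mc of a block of `run` copies of prev followed by a list not containing prev
theorem foldr_max_replicate (n a : Nat) (h : 1 ≤ n) : (List.replicate n a).foldr max 0 = a := by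
  induction n with
  | zero => omega
  | succ k ih =>
    cases k with
    | zero => simp
    | succ m => rw [List.replicate_succ, List.foldr_cons, ih (by omega)]; simp

theorem mc_split (prev : String) (run : Nat) (l : List String)
    (hrun : 1 ≤ run) (hout : prev ∉ l) :
    mc (List.replicate run prev ++ l) = max run (mc l) := by
  unfold mc
  rw [List.map_append]
  have h1 : (List.replicate run prev).map
      (fun w => (List.replicate run prev ++ l).count w) = List.replicate run run := by
    rw [List.map_replicate]
    congr 1
    rw [List.count_append, List.count_replicate, List.count_eq_zero.2 hout]
    simp
  have h2 : l.map (fun w => (List.replicate run prev ++ l).count w)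
      = l.map (fun w => l.count w) := by
    apply List.map_congr_left
    intro w hw
    have hne : w ≠ prev := fun h => hout (h ▸ hw)
    rw [List.count_append, List.count_replicate]
    simp [Ne.symm hne]
  rw [h1, h2, foldr_max_append, foldr_max_replicate _ _ hrun]

-- loop invariant: the run-length scan computes max_run ⊔ (max multiplicity of the whole
-- virtual list replicate run prev ++ l), provided that list is sorted and run ≤ max_run
theorem maxRunLoop_spec (l : List String) : ∀ (prev : String) (run max_run : Nat),
    1 ≤ run → run ≤ max_run →
    (List.replicate run prev ++ l).Pairwise (· ≤ ·) →
    maxRunLoop l prev run max_run = max max_run (mc (List.replicate run prev ++ l)) := by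
  induction l with
  | nil =>
    intro prev run max_run h1 hrm _
    have : mc (List.replicate run prev ++ []) = run := by
      rw [List.append_nil]
      have := mc_split prev run [] h1 (List.not_mem_nil)
      simpa [mc] using this
    simp [maxRunLoop, List.append_nil] at *
    omega
  | cons w ws ih =>
    intro prev run max_run h1 hrm hsorted
    by_cases hw : w = prev
    · subst hw
      have hrepl : List.replicate run w ++ w :: ws = List.replicate (run + 1) w ++ ws := by
        rw [List.replicate_succ' , List.append_assoc]
        rfl
      rw [hrepl] at hsorted ⊢
      have hih := ih w (run + 1) (if run + 1 > max_run then run + 1 else max_run)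
        (by omega) (by split <;> omega) hsorted
      rw [maxRunLoop, if_pos rfl, hih]
      have hmem : w ∈ List.replicate (run + 1) w ++ ws := by
        simp [List.mem_append, List.mem_replicate]
      have hcnt : run + 1 ≤ (List.replicate (run + 1) w ++ ws).count w := by
        rw [List.count_append, List.count_replicate]
        simp
      have : run + 1 ≤ mc (List.replicate (run + 1) w ++ ws) :=
        le_trans hcnt (count_le_mc _ _ hmem)
      split <;> omega
    · -- prev < w strictly, so prev does not occur in w :: ws
      have hple : ∀ y ∈ w :: ws, prev ≤ y := by
        intro y hy
        have := List.pairwise_append.1 hsorted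
        exact this.2.2 prev (by simp [List.mem_replicate]; omega) y hy
      have hwle : ∀ y ∈ ws, w ≤ y := by
        intro y hy
        have := (List.pairwise_append.1 hsorted).2.1
        exact (List.pairwise_cons.1 this).1 y hy
      have hnotin : prev ∉ w :: ws := by
        intro hmem
        rcases List.mem_cons.1 hmem with rfl | hmem'
        · exact hw rfl
        · have h1 : prev ≤ w := hple w (List.mem_cons_self)
          have h2 : w ≤ prev := hwle prev hmem'
          exact hw (le_antisymm h2 h1)
      have hsorted' : (List.replicate 1 w ++ ws).Pairwise (· ≤ ·) := by
        have := (List.pairwise_append.1 hsorted).2.1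
        simpa using this
      have hih := ih w 1 (if 1 > max_run then 1 else max_run)
        le_rfl (by split <;> omega) hsorted'
      rw [maxRunLoop, if_neg hw, hih]
      have hone : (if 1 > max_run then 1 else max_run) = max_run := by split <;> omega
      rw [hone]
      have hsplit₁ : mc (List.replicate run prev ++ w :: ws) = max run (mc (w :: ws)) :=
        mc_split prev run (w :: ws) h1 hnotin
      have hsplit₂ : mc (List.replicate 1 w ++ ws) = mc (w :: ws) := by
        simp [List.replicate]
      rw [hsplit₂, hsplit₁]
      omega

-- A's max over the counter's values equals mc of the lowered word list
theorem a_max_eq_mc (lw : List String) (m : Int)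
    (hm : PySem.List.max? (PySem.Dict.counter lw).values (fun v => v) = some m) :
    m = (mc lw : Int) := by
  have hvals : (PySem.Dict.counter lw).values
      = (PySem.Set.ofList lw).map (fun k => (List.count k lw : Int)) := by
    show (PySem.Dict.counter lw).items.map (fun x => x.2) = _
    rw [PySem.Dict.items_counter, List.map_map]
    rfl
  rw [hvals] at hm
  have hmem := PySem.List.max?_mem hm
  rcases List.mem_map.1 hmem with ⟨k, hk, hkeq⟩
  have hk' : k ∈ lw := (PySem.Set.mem_ofList lw k).1 hk
  apply le_antisymm
  · rw [← hkeq]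
    exact_mod_cast count_le_mc k lw hk'
  · have hle : ∀ w ∈ lw, lw.count w ≤ m.toNat := by
      intro w hw
      have : (↑(lw.count w) : Int) ≤ m :=
        PySem.List.max?_isMax hm _ (List.mem_map.2 ⟨w, (PySem.Set.mem_ofList lw w).2 hw, rfl⟩)
      omega
    have := mc_le m.toNat lw hle
    omega

theorem foldl_lower_counter (ws : List String) :
    ws.foldl (fun d word =>
        let word_lower := PySem.Str.lower word
        d.insert word_lower (d.getD word_lower 0 + 1)) PySem.Dict.empty
      = PySem.Dict.counter (ws.map PySem.Str.lower) := by
  rw [← PySem.Dict.foldl_insert_getD_add_one_eq_counter, List.foldl_map]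

theorem ports_agree (text : String) : is_valid_prompt_py text = is_valid_prompt_py_alt text := by
  by_cases h0 : PySem.Str.len text < 10
  · have hA : text = "" ∨ PySem.Str.len text < 10 := Or.inr h0
    simp only [is_valid_prompt_py, is_valid_prompt_py_alt, if_pos hA, if_pos h0]
  · have hA : ¬ (text = "" ∨ PySem.Str.len text < 10) := by
      rintro (rfl | h)
      · exact h0 (by decide)
      · exact h0 h
    simp only [is_valid_prompt_py, is_valid_prompt_py_alt, if_neg hA, if_neg h0]
    by_cases h3 : (PySem.Str.split₀ text).length < 3
    · simp only [if_pos h3]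
    · have hne : PySem.Str.split₀ text ≠ [] := by
        intro he; rw [he] at h3; exact h3 (by decide)
      simp only [if_neg h3, if_pos hne]
      set lw := (PySem.Str.split₀ text).map PySem.Str.lower with hlw
      set sw := PySem.List.sorted lw (fun x => x) false with hsw
      have hperm : sw.Perm lw := PySem.List.sorted_perm lw (fun x => x) false
      have hswne : sw ≠ [] := by
        intro he
        have hl := hperm.length_eq
        rw [he] at hl
        simp [hlw] at hl
        exact hne (List.length_eq_zero_iff.1 hl.symm)
      rcases hsw' : sw with _ | ⟨s0, rest⟩
      · exact absurd hsw' hswne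
      · -- B's branch
        have hsorted : (List.replicate 1 s0 ++ rest).Pairwise (· ≤ ·) := by
          have := PySem.List.sorted_pairwise lw (fun x => x)
          rw [← hsw, hsw'] at this
          simpa using this
        have hrun : maxRunLoop rest s0 1 1 = max 1 (mc (s0 :: rest)) := by
          have := maxRunLoop_spec rest s0 1 1 le_rfl le_rfl hsorted
          simpa using this
        have hmc : mc (s0 :: rest) = mc lw := by
          rw [← hsw']; exact mc_perm (hsw' ▸ hperm)
        rw [foldl_lower_counter]
        rcases hmax : PySem.List.max? (PySem.Dict.counter lw).values (fun v => v) with _ | m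
        · -- impossible: lw nonempty so counter has a value
          exfalso
          have hvne : (PySem.Dict.counter lw).values ≠ [] := by
            show (PySem.Dict.counter lw).items.map (fun x => x.2) ≠ []
            rw [PySem.Dict.items_counter]
            intro h
            rcases List.map_eq_nil_iff.1 h with hnil
            have hnil2 := List.map_eq_nil_iff.1 hnil
            rcases List.exists_mem_of_ne_nil _ hne with ⟨w, hw⟩
            have hmemlw : PySem.Str.lower w ∈ lw := List.mem_map.2 ⟨w, hw, rfl⟩
            have hmemset := (PySem.Set.mem_ofList _ (PySem.Str.lower w)).2 hmemlw
            rw [hnil2] at hmemset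
            exact absurd hmemset (List.not_mem_nil)
          exact hvne ((PySem.List.max?_eq_none_iff _ _).1 hmax)
        · have hmval : m = (mc lw : Int) := a_max_eq_mc lw m hmax
          have hlen : lw.length = (PySem.Str.split₀ text).length := by simp [hlw]
          have hm1 : 1 ≤ mc lw := by
            rcases List.exists_mem_of_ne_nil _ hne with ⟨w, hw⟩
            have hmem : PySem.Str.lower w ∈ lw := List.mem_map.2 ⟨w, hw, rfl⟩
            have h1 : 1 ≤ lw.count (PySem.Str.lower w) := List.count_pos_iff.2 hmem
            exact le_trans h1 (count_le_mc _ _ hmem)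
          have hrun' : maxRunLoop rest s0 1 1 = mc lw := by
            rw [hrun, hmc]; omega
          subst hmval
          change (if 2 * ((mc lw : Int)) > ((PySem.Str.split₀ text).length : Int) ∧ (PySem.Str.split₀ text).length > 5 then false else true)
            = !(decide (maxRunLoop rest s0 1 1 * 2 > (PySem.Str.split₀ text).length) && decide ((PySem.Str.split₀ text).length > 5))
          rw [hrun']
          by_cases hbig : 2 * ((mc lw : Int)) > ((PySem.Str.split₀ text).length : Int)
          · by_cases h5 : (PySem.Str.split₀ text).length > 5
            · have hb : mc lw * 2 > (PySem.Str.split₀ text).length := by omega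
              simp [hbig, h5, hb]
            · simp [h5]
          · have hb : ¬ mc lw * 2 > (PySem.Str.split₀ text).length := by omega
            simp [hbig, hb]

-- ===== VERDICT (by name: the statement is the Claim_ definition above) =====
theorem is_valid_prompt_py_spec : Claim_equal_is_valid_prompt_py := by
  intro text _
  unfold Spec_is_valid_prompt_py
  exact ports_agree text
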